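-- pv_equiv track=rewrite | github.com/TiesP/PY11 | news_txt.py | find_big_words
-- ===== SOURCE A (Python) =====
-- def find_big_words(min_length, file_text):
--     list_words = file_text.split()
--     words = {}
--     for word in list_words:
--         if len(word) > min_length:
--             if word in words:
--                 words[word] += 1
--             else:
--                 words[word] = 1
--     return words
-- ===== SOURCE B (Python) =====
-- def find_big_words(min_length, file_text):
--     big = [w for w in file_text.split() if len(w) > min_length]
--     return {w: big.count(w) for w in dict.fromkeys(big)}
-- ===== Notes on version B (the rewrite author's own statement) =====
-- stated objective: simpler
-- what changed: B replaces A's dict-accumulation loop (branching on key presence and incrementing) by a two-step comprehension: filter the long words once, then map each first-occurrence-deduplicated word to its count in the filtered list.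
import Mathlib
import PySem

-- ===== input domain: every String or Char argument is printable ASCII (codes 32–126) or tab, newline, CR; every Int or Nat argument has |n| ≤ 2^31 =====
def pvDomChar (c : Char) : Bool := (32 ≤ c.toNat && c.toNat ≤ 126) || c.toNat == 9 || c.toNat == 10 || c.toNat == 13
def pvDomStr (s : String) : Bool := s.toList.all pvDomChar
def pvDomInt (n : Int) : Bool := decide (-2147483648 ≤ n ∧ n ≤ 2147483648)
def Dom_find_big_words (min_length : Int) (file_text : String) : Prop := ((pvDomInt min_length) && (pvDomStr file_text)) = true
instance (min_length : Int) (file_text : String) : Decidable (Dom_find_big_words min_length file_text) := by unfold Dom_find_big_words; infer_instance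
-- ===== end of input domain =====

-- B rebuilds the dict from the ordered dedup of the filtered word list with a per-word count,
-- replacing A's hash-accumulation loop; objective: simpler (same exact value, key order included).


-- ===== PORT A =====
-- for word in file_text.split(): if len(word) > min_length: increment-or-initialise words[word]
def find_big_words (min_length : Int) (file_text : String) : List (String × Int) :=
  let list_words := PySem.Str.split₀ file_text
  let words : PySem.Dict String Int :=
    list_words.foldl (fun d word =>
      if min_length < (PySem.Str.len word : Int) then
        if d.contains word then d.insert word (d.getD word 0 + 1)
        else d.insert word 1
      else d) PySem.Dict.empty
  words.items

-- ===== PORT B =====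
-- big = filtered word list; result = {w: big.count(w) for w in dict.fromkeys(big)}
def find_big_words_alt (min_length : Int) (file_text : String) : List (String × Int) :=
  let big := (PySem.Str.split₀ file_text).filter
    (fun w => decide (min_length < (PySem.Str.len w : Int)))
  (PySem.List.dedup big).map (fun w => (w, (big.count w : Int)))

-- ===== PRECONDITION & SPEC =====
def Spec_find_big_words (min_length : Int) (file_text : String) (out : List (String × Int)) : Prop := out = find_big_words_alt min_length file_text
instance (min_length : Int) (file_text : String) (out : List (String × Int)) : Decidable (Spec_find_big_words min_length file_text out) := by unfold Spec_find_big_words; infer_instance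

-- ===== CLAIM (what is proved, stated in full; the proofs are below) =====
def Claim_equal_find_big_words : Prop := ∀ (min_length : Int) (file_text : String), Dom_find_big_words min_length file_text → Spec_find_big_words min_length file_text (find_big_words min_length file_text)

-- ===== LEMMAS AND PROOFS =====

-- A's two branches are both 'insert word (getD word 0 + 1)': when the key is absent, getD gives 0.
theorem find_big_words_step (d : PySem.Dict String Int) (w : String) :
    (if d.contains w then d.insert w (d.getD w 0 + 1) else d.insert w 1)
      = d.insert w (d.getD w 0 + 1) := by
  by_cases h : d.contains w = true
  · simp [h]
  · have hf : d.contains w = false := by simpa using h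
    have h0 : d.getD w 0 = 0 := by simp [pysem, hf]
    simp [h, h0]

-- Folding with an 'if p word then step else skip' body over all words equals folding the step
-- over the filtered list.
theorem find_big_words_fold_filter (l : List String) (p : String → Prop)
    [DecidablePred p] (d : PySem.Dict String Int) :
    l.foldl (fun d w => if p w then d.insert w (d.getD w 0 + 1) else d) d
      = (l.filter (fun w => decide (p w))).foldl (fun d w => d.insert w (d.getD w 0 + 1)) d := by
  induction l generalizing d with
  | nil => rfl
  | cons x xs ih =>
    by_cases h : p x <;> simp [h, ih]

-- ===== VERDICT (by name: the statement is the Claim_ definition above) =====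
theorem find_big_words_spec : Claim_equal_find_big_words := by
  intro min_length file_text _
  unfold Spec_find_big_words find_big_words find_big_words_alt
  simp only [find_big_words_step]
  rw [find_big_words_fold_filter, PySem.Dict.foldl_insert_getD_add_one_eq_counter,
    PySem.Dict.items_counter]
  simp [PySem.List.dedup_eq_ofList]
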